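-- pv_equiv track=rewrite | github.com/jayheat999-sketch/map-that-shit | embedding_cartographer.py | find_shared_vocab
-- ===== SOURCE A (Python) =====
-- def find_shared_vocab(vocabs):
--     """Find tokens shared across ALL models."""
--     if not vocabs:
--         return {}
--
--     shared_tokens = set(vocabs[0].keys())
--     for v in vocabs[1:]:
--         shared_tokens &= set(v.keys())
--
--     # Filter special tokens
--     shared_tokens = {t for t in shared_tokens
--                      if not (t.startswith('<') and t.endswith('>'))}
--
--     # Build mapping: token → tuple of IDs (one per model)
--     shared = {}
--     for tok in shared_tokens:
--         ids = tuple(v[tok] for v in vocabs)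
--         shared[tok] = ids
--
--     return shared
-- ===== SOURCE B (Python) =====
-- def find_shared_vocab(vocabs):
--     """Find tokens shared across ALL models."""
--     n = len(vocabs)
--     counts = {}
--     for v in vocabs:
--         for tok in v:
--             counts[tok] = counts.get(tok, 0) + 1
--     return {tok: tuple(v[tok] for v in vocabs)
--             for tok, c in counts.items()
--             if c == n and not (tok.startswith('<') and tok.endswith('>'))}
-- ===== Notes on version B (the rewrite author's own statement) =====
-- stated objective: alternative
-- what changed: Replaced the iterated set-intersection pass plus set comprehension with a single counting pass over all vocabs (a frequency dict) followed by a count==len(vocabs) filter; the empty input needs no guard since the counter is then empty.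
import Mathlib
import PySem

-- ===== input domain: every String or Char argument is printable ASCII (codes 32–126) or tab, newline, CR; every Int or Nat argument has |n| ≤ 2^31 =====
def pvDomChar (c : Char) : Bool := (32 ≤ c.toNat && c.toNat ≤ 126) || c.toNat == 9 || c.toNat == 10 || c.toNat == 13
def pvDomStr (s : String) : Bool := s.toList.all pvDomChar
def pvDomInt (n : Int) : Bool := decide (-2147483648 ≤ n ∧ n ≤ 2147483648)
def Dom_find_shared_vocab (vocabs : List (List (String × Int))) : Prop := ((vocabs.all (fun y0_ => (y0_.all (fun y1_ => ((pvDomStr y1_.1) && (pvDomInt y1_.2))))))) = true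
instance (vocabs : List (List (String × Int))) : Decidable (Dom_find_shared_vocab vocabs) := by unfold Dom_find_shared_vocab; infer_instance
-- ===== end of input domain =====

-- B replaces A's iterated set intersections + set comprehension by one counting pass
-- (token → in how many vocabs) and a count == len(vocabs) filter: a different decomposition, same cost class.
-- Output is a Python dict (compared as a dict); both ports emit it in vocabs[0] key order.

-- ===== PORT A =====
-- v[tok] is ported as get? + getD 0; the default is unreachable: tok is in every vocab by construction.
def find_shared_vocab (vocabs : List (List (String × Int))) : List (String × List Int) :=
  match vocabs with
  | [] => []
  | v0 :: rest =>
      (((rest.foldl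
            (fun s v => PySem.Set.inter s (PySem.Set.ofList (PySem.Dict.ofList v).keys))
            (PySem.Set.ofList (PySem.Dict.ofList v0).keys)).filter
          (fun t => !(PySem.Str.startswith t "<" && PySem.Str.endswith t ">"))).foldl
        (fun d tok =>
          d.insert tok ((v0 :: rest).map (fun v => ((PySem.Dict.ofList v).get? tok).getD 0)))
        PySem.Dict.empty).items

-- ===== PORT B =====
-- counts[tok] = counts.get(tok, 0) + 1 over every vocab's keys, then the dict comprehension
-- keeps tokens with count == len(vocabs) that are not special.  v[tok] ported as in A (unreachable default).
def find_shared_vocab_alt (vocabs : List (List (String × Int))) : List (String × List Int) :=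
  ((((vocabs.foldl
        (fun d v => (PySem.Dict.ofList v).keys.foldl (fun d tok => d.insert tok (d.getD tok 0 + 1)) d)
        PySem.Dict.empty).items).filter
      (fun p => p.2 == (vocabs.length : Int) &&
        !(PySem.Str.startswith p.1 "<" && PySem.Str.endswith p.1 ">"))).foldl
    (fun d p => d.insert p.1 (vocabs.map (fun v => ((PySem.Dict.ofList v).get? p.1).getD 0)))
    PySem.Dict.empty).items

-- ===== PRECONDITION & SPEC =====
def Spec_find_shared_vocab (vocabs : List (List (String × Int))) (out : List (String × List Int)) : Prop := out = find_shared_vocab_alt vocabs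
instance (vocabs : List (List (String × Int))) (out : List (String × List Int)) : Decidable (Spec_find_shared_vocab vocabs out) := by unfold Spec_find_shared_vocab; infer_instance

-- ===== CLAIM (what is proved, stated in full; the proofs are below) =====
def Claim_equal_find_shared_vocab : Prop := ∀ (vocabs : List (List (String × Int))), Dom_find_shared_vocab vocabs → Spec_find_shared_vocab vocabs (find_shared_vocab vocabs)

-- ===== LEMMAS AND PROOFS =====

-- A's intersection loop is one filter over the initial key set.
lemma pv_foldl_inter_eq_filter (l : List (List (String × Int))) (s0 : List String) :
    l.foldl (fun s v => PySem.Set.inter s (PySem.Set.ofList (PySem.Dict.ofList v).keys)) s0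
      = s0.filter (fun t => l.all (fun v => (PySem.Set.ofList (PySem.Dict.ofList v).keys).contains t)) := by
  induction l generalizing s0 with
  | nil => simp
  | cons v l ih =>
    rw [List.foldl_cons, ih]
    simp only [PySem.Set.inter, List.filter_filter, List.all_cons]
    exact List.filter_congr (fun t _ => Bool.and_comm _ _)

-- building a dict by inserting along a duplicate-free key list appends all its items
lemma pv_build_items {β : Type} (l : List β) (key : β → String) (V : β → List Int)
    (h : (l.map key).Nodup) :
    (l.foldl (fun d p => d.insert (key p) (V p)) PySem.Dict.empty).items
      = l.map (fun p => (key p, V p)) := by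
  rw [PySem.Dict.items_foldl_insert_fresh l key V PySem.Dict.empty
    (fun a _ => PySem.Dict.contains_empty _) h]
  rfl

-- how often a token occurs in the concatenation of all key lists
lemma pv_count_flatMap (t : String) (l : List (List (String × Int))) :
    (l.flatMap (fun v => (PySem.Dict.ofList v).keys)).count t
      = l.countP (fun v => decide (t ∈ (PySem.Dict.ofList v).keys)) := by
  induction l with
  | nil => simp
  | cons v l ih =>
    rw [List.flatMap_cons, List.count_append, ih, List.countP_cons]
    by_cases h : t ∈ (PySem.Dict.ofList v).keys
    · rw [List.count_eq_one_of_mem (PySem.Dict.nodup_keys_ofList v) h]; simp [h]; omega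
    · rw [List.count_eq_zero_of_not_mem h]; simp [h]

-- characterisation of port A on a non-empty input
lemma pv_A_char (v0 : List (String × Int)) (rest : List (List (String × Int))) :
    find_shared_vocab (v0 :: rest)
      = (((PySem.Dict.ofList v0).keys).filter
          (fun t => !(PySem.Str.startswith t "<" && PySem.Str.endswith t ">") &&
            rest.all (fun v => (PySem.Set.ofList (PySem.Dict.ofList v).keys).contains t))).map
          (fun t => (t, (v0 :: rest).map (fun v => ((PySem.Dict.ofList v).get? t).getD 0))) := by
  simp only [find_shared_vocab]
  rw [pv_foldl_inter_eq_filter,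
    PySem.Set.ofList_eq_self_of_nodup _ (PySem.Dict.nodup_keys_ofList v0), List.filter_filter]
  exact pv_build_items _ (fun t => t)
    (fun tok => (v0 :: rest).map (fun v => ((PySem.Dict.ofList v).get? tok).getD 0))
    (by simpa using List.Nodup.filter _ (PySem.Dict.nodup_keys_ofList v0))

-- first components of (k, c k) pairs over a duplicate-free list stay duplicate-free
lemma pv_nodup_fst_pair (l : List String) (c : String → Int) (h : l.Nodup) :
    ((l.map (fun k => (k, c k))).map (fun p : String × Int => p.1)).Nodup := by
  rw [List.map_map]
  have hid : ((fun p : String × Int => p.1) ∘ fun k => (k, c k)) = fun k => k := rfl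
  rw [hid]
  simpa using h

-- characterisation of port B
lemma pv_B_char (vocabs : List (List (String × Int))) :
    find_shared_vocab_alt vocabs
      = ((PySem.Set.ofList (vocabs.flatMap (fun v => (PySem.Dict.ofList v).keys))).filter
          (fun t => ((vocabs.flatMap (fun v => (PySem.Dict.ofList v).keys)).count t : Int) == (vocabs.length : Int) &&
            !(PySem.Str.startswith t "<" && PySem.Str.endswith t ">"))).map
          (fun t => (t, vocabs.map (fun v => ((PySem.Dict.ofList v).get? t).getD 0))) := by
  have hc : vocabs.foldl
      (fun d v => (PySem.Dict.ofList v).keys.foldl (fun d tok => d.insert tok (d.getD tok 0 + 1)) d)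
      PySem.Dict.empty
      = PySem.Dict.counter (vocabs.flatMap (fun v => (PySem.Dict.ofList v).keys)) := by
    rw [← PySem.Dict.foldl_insert_getD_add_one_eq_counter, List.flatMap_def, List.foldl_flatten,
      List.foldl_map]
  simp only [find_shared_vocab_alt]
  rw [hc, PySem.Dict.items_counter, List.filter_map]
  refine (pv_build_items _ (fun p : String × Int => p.1)
    (fun p => vocabs.map (fun v => ((PySem.Dict.ofList v).get? p.1).getD 0)) ?_).trans ?_
  · exact pv_nodup_fst_pair _ _
      (List.Nodup.filter _ (PySem.Set.nodup_ofList (vocabs.flatMap (fun v => (PySem.Dict.ofList v).keys))))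
  · rw [List.map_map]
    rfl

-- the two token lists coincide, order included
lemma pv_tokens_eq (v0 : List (String × Int)) (rest : List (List (String × Int))) :
    (PySem.Set.ofList ((v0 :: rest).flatMap (fun v => (PySem.Dict.ofList v).keys))).filter
        (fun t => (((v0 :: rest).flatMap (fun v => (PySem.Dict.ofList v).keys)).count t : Int) == ((v0 :: rest).length : Int) &&
          !(PySem.Str.startswith t "<" && PySem.Str.endswith t ">"))
      = ((PySem.Dict.ofList v0).keys).filter
          (fun t => !(PySem.Str.startswith t "<" && PySem.Str.endswith t ">") &&
            rest.all (fun v => (PySem.Set.ofList (PySem.Dict.ofList v).keys).contains t)) := by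
  rw [List.flatMap_cons, PySem.Set.ofList_append, PySem.Set.update_eq_append_filter,
    PySem.Set.ofList_eq_self_of_nodup _ (PySem.Dict.nodup_keys_ofList v0), List.filter_append]
  have hzero :
      (((PySem.Set.ofList (rest.flatMap (fun v => (PySem.Dict.ofList v).keys))).filter
        (fun y => !(PySem.Set.contains ((PySem.Dict.ofList v0).keys) y))).filter
        (fun t => ((((PySem.Dict.ofList v0).keys ++ rest.flatMap (fun v => (PySem.Dict.ofList v).keys)).count t : Nat) : Int) == ((v0 :: rest).length : Int) &&
          !(PySem.Str.startswith t "<" && PySem.Str.endswith t ">"))) = [] := by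
    apply List.filter_eq_nil_iff.mpr
    intro t ht
    have hnot : t ∉ (PySem.Dict.ofList v0).keys := by
      have := (List.mem_filter.mp ht).2
      simpa [PySem.Set.contains_iff] using this
    have hlt : ((PySem.Dict.ofList v0).keys ++ rest.flatMap (fun v => (PySem.Dict.ofList v).keys)).count t
        < (v0 :: rest).length := by
      rw [List.count_append, List.count_eq_zero_of_not_mem hnot, pv_count_flatMap, List.length_cons]
      have := List.countP_le_length (p := fun v => decide (t ∈ (PySem.Dict.ofList v).keys)) (l := rest)
      omega
    simp only [Bool.and_eq_true, beq_iff_eq, not_and]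
    intro h
    exact absurd (by exact_mod_cast h) (Nat.ne_of_lt hlt)
  rw [hzero, List.append_nil]
  apply List.filter_congr
  intro t ht
  have hone : ((PySem.Dict.ofList v0).keys).count t = 1 :=
    List.count_eq_one_of_mem (PySem.Dict.nodup_keys_ofList v0) ht
  have hcnt : ((PySem.Dict.ofList v0).keys ++ rest.flatMap (fun v => (PySem.Dict.ofList v).keys)).count t
      = 1 + rest.countP (fun v => decide (t ∈ (PySem.Dict.ofList v).keys)) := by
    rw [List.count_append, hone, pv_count_flatMap]
  conv_lhs => rw [Bool.and_comm]
  congr 1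
  rw [← Bool.coe_iff_coe]
  simp only [beq_iff_eq, Nat.cast_inj, List.all_eq_true, PySem.Set.contains_iff,
    PySem.Set.mem_ofList, hcnt, List.length_cons]
  constructor
  · intro h v hv
    have hlen : rest.countP (fun v => decide (t ∈ (PySem.Dict.ofList v).keys)) = rest.length := by omega
    have := List.countP_eq_length.mp hlen v hv
    simpa using this
  · intro h
    have : rest.countP (fun v => decide (t ∈ (PySem.Dict.ofList v).keys)) = rest.length :=
      List.countP_eq_length.mpr (fun v hv => by simpa using h v hv)
    omega

-- ===== VERDICT (by name: the statement is the Claim_ definition above) =====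
theorem find_shared_vocab_spec : Claim_equal_find_shared_vocab := by
  intro vocabs _hdom
  unfold Spec_find_shared_vocab
  cases vocabs with
  | nil => rfl
  | cons v0 rest => rw [pv_A_char, pv_B_char, pv_tokens_eq]
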